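-- pv_equiv track=rewrite | github.com/AtharvaTilewale/mdplots | scripts/RMSF/rmsf_heatmap_dashboard.py | residues_to_intervals
-- ===== SOURCE A (Python) =====
-- def residues_to_intervals(residues):
--     """
--     Convert a sorted list of residue numbers into intervals.
--     E.g., [5,6,7,10,11] -> [(5,7), (10,11)]
--     """
--     sorted_res = sorted(residues)
--     intervals = []
--     start = prev = sorted_res[0]
--     for r in sorted_res[1:]:
--         if r == prev + 1:
--             prev = r
--         else:
--             intervals.append((start, prev))
--             start = prev = r
--     intervals.append((start, prev))
--     return intervals
-- ===== SOURCE B (Python) =====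
-- def residues_to_intervals(residues):
--     """Convert residue numbers into consecutive-run intervals, e.g. [5,6,7,10,11] -> [(5,7),(10,11)]."""
--     s = sorted(residues)
--     last = s[-1]
--     pairs = list(zip(s, s[1:]))
--     starts = [s[0]] + [y for x, y in pairs if y != x + 1]
--     ends = [x for x, y in pairs if y != x + 1] + [last]
--     return list(zip(starts, ends))
-- ===== Notes on version B (the rewrite author's own statement) =====
-- stated objective: alternative
-- what changed: A makes one stateful sweep with an (intervals, start, prev) accumulator; B instead computes the break pairs once via zip(s, s[1:]), builds the interval-start and interval-end lists as two independent comprehensions, and zips them into the result.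
import Mathlib
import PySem

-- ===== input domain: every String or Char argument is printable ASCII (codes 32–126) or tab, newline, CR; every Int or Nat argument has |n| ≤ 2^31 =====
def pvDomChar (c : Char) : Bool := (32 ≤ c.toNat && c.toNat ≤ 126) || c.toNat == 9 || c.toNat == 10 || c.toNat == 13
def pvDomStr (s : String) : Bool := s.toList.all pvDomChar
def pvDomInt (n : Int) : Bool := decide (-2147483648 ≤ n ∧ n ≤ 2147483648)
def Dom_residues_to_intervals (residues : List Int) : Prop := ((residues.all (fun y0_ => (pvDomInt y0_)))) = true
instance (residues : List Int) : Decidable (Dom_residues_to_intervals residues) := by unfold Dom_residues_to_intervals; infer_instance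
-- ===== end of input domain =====

-- B replaces A's single stateful sweep (intervals/start/prev accumulator) by a staged construction:
-- break pairs from zip(s, s[1:]), separate starts/ends lists, zipped together (alternative decomposition,
-- same cost); Pre_ excludes only the empty list, on which both programs raise IndexError.


-- ===== PORT A =====
-- literal port of A: sort, then fold over the tail with state (intervals, start, prev);
-- on [] Python raises IndexError at sorted_res[0] (excluded by Pre_), the port returns [] there.
def residues_to_intervals (residues : List Int) : List (Int × Int) :=
  let sorted_res := PySem.List.sorted residues (fun x => x) false
  match sorted_res with
  | [] => []
  | h :: tail =>
    let st := tail.foldl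
      (fun (s : List (Int × Int) × Int × Int) r =>
        if r = s.2.2 + 1 then (s.1, s.2.1, r)
        else (s.1 ++ [(s.2.1, s.2.2)], r, r)) ([], h, h)
    st.1 ++ [(st.2.1, st.2.2)]

-- ===== PORT B =====
-- port of Source B: sort; s[-1] raises IndexError on [] (excluded by Pre_), so the port returns [] there;
-- pairs = zip(s, s[1:]); starts/ends built by the two comprehensions; zip them.
def residues_to_intervals_alt (residues : List Int) : List (Int × Int) :=
  let s := PySem.List.sorted residues (fun x => x) false
  match s with
  | [] => []
  | h :: t =>
    let pairs := List.zip (h :: t) t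
    let starts := h :: pairs.filterMap (fun p => if p.2 ≠ p.1 + 1 then some p.2 else none)
    let ends := pairs.filterMap (fun p => if p.2 ≠ p.1 + 1 then some p.1 else none) ++ [(h :: t).getLastD 0]
    List.zip starts ends

-- ===== PRECONDITION & SPEC =====
-- Pre_ excludes only the empty list, on which A (and B) raise IndexError.
def Pre_residues_to_intervals (residues : List Int) : Prop := residues ≠ []
instance (residues : List Int) : Decidable (Pre_residues_to_intervals residues) := by unfold Pre_residues_to_intervals; infer_instance
def pvWitness_residues_to_intervals : List Int := ([5, 6, 7, 10, 11])

def Spec_residues_to_intervals (residues : List Int) (out : List (Int × Int)) : Prop := out = residues_to_intervals_alt residues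
instance (residues : List Int) (out : List (Int × Int)) : Decidable (Spec_residues_to_intervals residues out) := by unfold Spec_residues_to_intervals; infer_instance

-- ===== CLAIM (what is proved, stated in full; the proofs are below) =====
def Claim_equal_residues_to_intervals : Prop := ∀ (residues : List Int), Dom_residues_to_intervals residues → Pre_residues_to_intervals residues → Spec_residues_to_intervals residues (residues_to_intervals residues)

-- ===== LEMMAS AND PROOFS =====

def pvStep (s : List (Int × Int) × Int × Int) (r : Int) : List (Int × Int) × Int × Int :=
  if r = s.2.2 + 1 then (s.1, s.2.1, r)
  else (s.1 ++ [(s.2.1, s.2.2)], r, r)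

-- loop invariant: finishing A's fold from state (acc, start, prev) over t yields acc followed by
-- B's zip of the start/end lists for the list (prev :: t) with first start replaced by start
theorem foldl_step_eq_zip (t : List Int) (acc : List (Int × Int)) (start prev : Int) :
    (let st := t.foldl pvStep (acc, start, prev); st.1 ++ [(st.2.1, st.2.2)]) =
      acc ++ List.zip
        (start :: (List.zip (prev :: t) t).filterMap (fun p => if p.2 ≠ p.1 + 1 then some p.2 else none))
        ((List.zip (prev :: t) t).filterMap (fun p => if p.2 ≠ p.1 + 1 then some p.1 else none)
          ++ [(prev :: t).getLastD 0]) := by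
  induction t generalizing acc start prev with
  | nil => simp
  | cons y ys ih =>
    by_cases h : y = prev + 1
    · simpa [pvStep, h, List.getLastD_cons] using ih acc start y
    · have hih := ih (acc ++ [(start, prev)]) y y
      simp only [pvStep, List.foldl_cons, if_neg h] at hih ⊢
      rw [hih]
      simp [List.zip_cons_cons, h, List.append_assoc]

-- ===== VERDICT (by name: the statement is the Claim_ definition above) =====
theorem residues_to_intervals_spec : Claim_equal_residues_to_intervals := by
  intro residues _ hpre
  unfold Spec_residues_to_intervals residues_to_intervals residues_to_intervals_alt
  have hne : PySem.List.sorted residues (fun x => x) false ≠ [] := by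
    intro h
    exact hpre (List.eq_nil_of_length_eq_zero (by
      simpa [h] using (PySem.List.length_sorted (xs := residues) (key := fun x => x) (rev := false)).symm))
  cases hs : PySem.List.sorted residues (fun x => x) false with
  | nil => exact absurd hs hne
  | cons h tail =>
    simpa [pvStep] using foldl_step_eq_zip tail [] h h
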